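-- pv_equiv track=rewrite | github.com/emandabisrat/coursework-upstream | hw5/hw5.py | find_region_locations
-- ===== SOURCE A (Python) =====
-- def find_region_locations(image, loc, radius):
--     '''
--     A function that takes an image, location (i,j), and radius and returns a new
--     list of locations in a specified region.
--
--     Inputs:
--         image (list) : A list of list of tuples
--         loc (i,j) : a location in terms of a list
--         radius (int) : an integer
--
--     Output:
--         region_locations (lst) : a list of tuples of locations
--     '''
--     lst = []
--     for i, x in enumerate(image):
--         for j, item in enumerate(x):
--             k = loc[0]
--             l = loc[1]
--             if radius >= abs(i - k) and radius >= abs(j - l):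
--                 lst.append((i,j))
--     return lst
-- ===== SOURCE B (Python) =====
-- def find_region_locations(image, loc, radius):
--     '''Same result as A, but visits only the clamped (2r+1)^2 window around loc.'''
--     k = loc[0]
--     l = loc[1]
--     out = []
--     for i in range(max(0, k - radius), min(len(image), k + radius + 1)):
--         row_len = len(image[i])
--         for j in range(max(0, l - radius), min(row_len, l + radius + 1)):
--             out.append((i, j))
--     return out
-- ===== Notes on version B (the rewrite author's own statement) =====
-- stated objective: faster
-- what changed: Instead of scanning every pixel of the image and testing the Chebyshev distance, B iterates directly over the clamped (2*radius+1)-square window around loc, so only candidate locations are visited.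
-- outside the precondition, e.g. on find_region_locations([[]], [], 0): A returns [], B raises IndexError
import Mathlib
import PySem

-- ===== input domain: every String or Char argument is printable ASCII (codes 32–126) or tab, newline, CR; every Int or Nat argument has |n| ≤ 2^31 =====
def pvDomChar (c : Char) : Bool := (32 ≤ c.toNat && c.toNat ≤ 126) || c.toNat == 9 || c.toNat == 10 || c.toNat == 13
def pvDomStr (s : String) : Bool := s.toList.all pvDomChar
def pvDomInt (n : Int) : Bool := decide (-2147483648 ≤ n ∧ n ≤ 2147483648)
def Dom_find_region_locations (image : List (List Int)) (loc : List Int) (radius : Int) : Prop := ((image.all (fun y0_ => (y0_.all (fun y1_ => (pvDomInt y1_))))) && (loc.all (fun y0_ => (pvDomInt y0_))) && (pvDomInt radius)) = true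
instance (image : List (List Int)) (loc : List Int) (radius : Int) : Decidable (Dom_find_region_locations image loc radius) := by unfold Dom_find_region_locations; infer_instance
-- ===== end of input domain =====

-- B iterates only the clamped (2*radius+1)-square window around loc instead of
-- scanning the whole image and testing every pixel's Chebyshev distance.

-- ===== PORT A =====
def find_region_locations (image : List (List Int)) (loc : List Int) (radius : Int) : List (Int × Int) :=
  (PySem.List.enumerate image).foldl (fun lst ix =>
    (PySem.List.enumerate ix.2).foldl (fun lst2 ji =>
      let k := PySem.List.pyGetD loc 0 0
      let l := PySem.List.pyGetD loc 1 0
      if radius ≥ |ix.1 - k| ∧ radius ≥ |ji.1 - l| then lst2 ++ [(ix.1, ji.1)] else lst2) lst) []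

-- ===== PORT B =====
def find_region_locations_alt (image : List (List Int)) (loc : List Int) (radius : Int) : List (Int × Int) :=
  let k := PySem.List.pyGetD loc 0 0
  let l := PySem.List.pyGetD loc 1 0
  (PySem.List.pyRange (max 0 (k - radius)) (min (PySem.List.len image) (k + radius + 1)) 1).foldl
    (fun out i =>
      let rowLen := PySem.List.len (PySem.List.pyGetD image i [])
      (PySem.List.pyRange (max 0 (l - radius)) (min rowLen (l + radius + 1)) 1).foldl
        (fun o j => o ++ [(i, j)]) out) []

-- ===== PRECONDITION & SPEC =====
-- Pre_ excludes loc with fewer than two entries: there A raises IndexError on loc[0]/loc[1]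
-- whenever some row is nonempty (and B always does); the only excluded inputs where A still
-- returns are degenerate images whose rows are all empty, on which A returns [] but B raises.
def Pre_find_region_locations (image : List (List Int)) (loc : List Int) (radius : Int) : Prop :=
  2 ≤ loc.length
instance (image : List (List Int)) (loc : List Int) (radius : Int) : Decidable (Pre_find_region_locations image loc radius) := by unfold Pre_find_region_locations; infer_instance

def pvWitness_find_region_locations : List (List Int) × List Int × Int := ([[1, 2], [3, 4]], [0, 1], 1)

def Spec_find_region_locations (image : List (List Int)) (loc : List Int) (radius : Int) (out : List (Int × Int)) : Prop := out = find_region_locations_alt image loc radius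
instance (image : List (List Int)) (loc : List Int) (radius : Int) (out : List (Int × Int)) : Decidable (Spec_find_region_locations image loc radius out) := by unfold Spec_find_region_locations; infer_instance

-- ===== CLAIM (what is proved, stated in full; the proofs are below) =====
def Claim_equal_find_region_locations : Prop := ∀ (image : List (List Int)) (loc : List Int) (radius : Int), Dom_find_region_locations image loc radius → Pre_find_region_locations image loc radius → Spec_find_region_locations image loc radius (find_region_locations image loc radius)

-- ===== LEMMAS AND PROOFS =====

-- 'if p: out.append(f x)' loop with a Prop test
theorem foldl_append_ite {α β : Type} (P : α → Prop) [DecidablePred P] (f : α → β)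
    (l : List α) (acc : List β) :
    l.foldl (fun a x => if P x then a ++ [f x] else a) acc
      = acc ++ (l.filter (fun x => decide (P x))).map f := by
  induction l generalizing acc with
  | nil => simp
  | cons x xs ih =>
    by_cases h : P x <;> simp [List.foldl_cons, ih, h]

theorem flatMap_ite_nil {α β : Type} (P : α → Prop) [DecidablePred P] (G : α → List β)
    (l : List α) :
    l.flatMap (fun x => if P x then G x else [])
      = (l.filter (fun x => decide (P x))).flatMap G := by
  induction l with
  | nil => rfl
  | cons x xs ih =>
    by_cases h : P x <;> simp [List.flatMap_cons, ih, h]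

-- filtering [0, n) by |j - l| ≤ radius IS the clamped window range
theorem range_filter_window (n l radius : Int) :
    (PySem.List.pyRange 0 n 1).filter (fun j => decide (radius ≥ |j - l|))
      = PySem.List.pyRange (max 0 (l - radius)) (min n (l + radius + 1)) 1 := by
  set a := max 0 (l - radius) with ha
  set b := min n (l + radius + 1) with hb
  by_cases hab : b ≤ a
  · rw [PySem.List.pyRange_one_eq_nil hab, List.filter_eq_nil_iff]
    intro j hj
    rw [PySem.List.mem_pyRange_one] at hj
    simp only [decide_eq_true_eq, ge_iff_le, abs_le]
    omega
  · rw [not_le] at hab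
    have h0a : (0 : Int) ≤ a := le_max_left _ _
    have hbn : b ≤ n := min_le_left _ _
    rw [PySem.List.pyRange_one_append 0 a n h0a (by omega),
        PySem.List.pyRange_one_append a b n (le_of_lt hab) hbn,
        List.filter_append, List.filter_append]
    have h1 : (PySem.List.pyRange 0 a 1).filter (fun j => decide (radius ≥ |j - l|)) = [] := by
      rw [List.filter_eq_nil_iff]
      intro j hj
      rw [PySem.List.mem_pyRange_one] at hj
      simp only [decide_eq_true_eq, ge_iff_le, abs_le]
      omega
    have h3 : (PySem.List.pyRange b n 1).filter (fun j => decide (radius ≥ |j - l|)) = [] := by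
      rw [List.filter_eq_nil_iff]
      intro j hj
      rw [PySem.List.mem_pyRange_one] at hj
      simp only [decide_eq_true_eq, ge_iff_le, abs_le]
      omega
    have h2 : (PySem.List.pyRange a b 1).filter (fun j => decide (radius ≥ |j - l|))
        = PySem.List.pyRange a b 1 := by
      rw [List.filter_eq_self]
      intro j hj
      rw [PySem.List.mem_pyRange_one] at hj
      simp only [decide_eq_true_eq, ge_iff_le, abs_le]
      omega
    rw [h1, h2, h3, List.nil_append, List.append_nil]

-- one row of A collapsed to the clamped column window
theorem row_window (i l radius : Int) (x : List Int) :
    ((PySem.List.enumerate x).filter (fun q => decide (radius ≥ |q.1 - l|))).map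
        (fun q => (i, q.1))
      = (PySem.List.pyRange (max 0 (l - radius)) (min (PySem.List.len x) (l + radius + 1)) 1).map
          (fun j => (i, j)) := by
  have hmap : ∀ (ys : List (Int × Int)),
      ys.map (fun q => (i, q.1)) = (ys.map Prod.fst).map (fun j => (i, j)) := by
    intro ys; rw [List.map_map]; rfl
  have hswap : ∀ (ys : List (Int × Int)),
      (ys.filter (fun q => decide (radius ≥ |q.1 - l|))).map Prod.fst
        = (ys.map Prod.fst).filter (fun j => decide (radius ≥ |j - l|)) := by
    intro ys
    induction ys with
    | nil => rfl
    | cons y ys ih =>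
      by_cases h : radius ≥ |y.1 - l| <;>
        simp [List.map_cons, h, ih]
  rw [hmap, hswap, PySem.List.map_fst_enumerate, zero_add]
  rw [show PySem.List.pyRange 0 ((x.length : Int)) 1 = PySem.List.pyRange 0 (PySem.List.len x) 1 by
        simp [PySem.List.len_eq]]
  rw [range_filter_window]

theorem find_region_locations_eq_flatMap (image : List (List Int)) (loc : List Int) (radius : Int) :
    find_region_locations image loc radius
      = (PySem.List.pyRange (max 0 (PySem.List.pyGetD loc 0 0 - radius))
          (min (PySem.List.len image) (PySem.List.pyGetD loc 0 0 + radius + 1)) 1).flatMap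
          (fun i =>
            (PySem.List.pyRange (max 0 (PySem.List.pyGetD loc 1 0 - radius))
              (min (PySem.List.len (PySem.List.pyGetD image i []))
                (PySem.List.pyGetD loc 1 0 + radius + 1)) 1).map (fun j => (i, j))) := by
  set k := PySem.List.pyGetD loc 0 0 with hk
  set l := PySem.List.pyGetD loc 1 0 with hl
  unfold find_region_locations
  have hinner : ∀ (p : Int × List Int) (acc : List (Int × Int)),
      (PySem.List.enumerate p.2).foldl (fun lst2 ji =>
          if radius ≥ |p.1 - k| ∧ radius ≥ |ji.1 - l| then lst2 ++ [(p.1, ji.1)] else lst2) acc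
        = acc ++ (if radius ≥ |p.1 - k| then
            (PySem.List.pyRange (max 0 (l - radius)) (min (PySem.List.len p.2) (l + radius + 1)) 1).map
              (fun j => (p.1, j))
          else []) := by
    intro p acc
    rw [foldl_append_ite (P := fun ji : Int × Int => radius ≥ |p.1 - k| ∧ radius ≥ |ji.1 - l|)
        (f := fun ji : Int × Int => (p.1, ji.1))]
    by_cases h : radius ≥ |p.1 - k|
    · simp only [h, true_and, if_true]
      rw [← row_window p.1 l radius p.2]
    · simp only [h, false_and, if_false, decide_false]
      simp
  calc (PySem.List.enumerate image).foldl (fun lst ix =>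
        (PySem.List.enumerate ix.2).foldl (fun lst2 ji =>
          if radius ≥ |ix.1 - k| ∧ radius ≥ |ji.1 - l| then lst2 ++ [(ix.1, ji.1)] else lst2) lst) []
      = (PySem.List.enumerate image).foldl (fun lst ix => lst ++
          (if radius ≥ |ix.1 - k| then
            (PySem.List.pyRange (max 0 (l - radius)) (min (PySem.List.len ix.2) (l + radius + 1)) 1).map
              (fun j => (ix.1, j))
          else [])) [] := by
        exact PySem.List.foldl_congr_mem _ _ _ _ (by intro acc x _; exact hinner x acc)
    _ = (PySem.List.enumerate image).flatMap (fun ix =>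
          if radius ≥ |ix.1 - k| then
            (PySem.List.pyRange (max 0 (l - radius)) (min (PySem.List.len ix.2) (l + radius + 1)) 1).map
              (fun j => (ix.1, j))
          else []) := by
        rw [PySem.List.foldl_append_eq_flatMap]; rfl
    _ = (PySem.List.pyRange 0 (PySem.List.len image) 1).flatMap (fun i =>
          if radius ≥ |i - k| then
            (PySem.List.pyRange (max 0 (l - radius))
              (min (PySem.List.len (PySem.List.pyGetD image i [])) (l + radius + 1)) 1).map
              (fun j => (i, j))
          else []) := by
        rw [PySem.List.enumerate_eq_map_pyRange image ([] : List Int), List.flatMap_map]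
    _ = _ := by
        rw [flatMap_ite_nil (P := fun i : Int => radius ≥ |i - k|)]
        rw [show PySem.List.pyRange 0 (PySem.List.len image) 1
              = PySem.List.pyRange 0 ((PySem.List.len image : Int)) 1 by rfl]
        rw [range_filter_window (PySem.List.len image) k radius]

theorem alt_eq_flatMap (image : List (List Int)) (loc : List Int) (radius : Int) :
    find_region_locations_alt image loc radius
      = (PySem.List.pyRange (max 0 (PySem.List.pyGetD loc 0 0 - radius))
          (min (PySem.List.len image) (PySem.List.pyGetD loc 0 0 + radius + 1)) 1).flatMap
          (fun i =>
            (PySem.List.pyRange (max 0 (PySem.List.pyGetD loc 1 0 - radius))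
              (min (PySem.List.len (PySem.List.pyGetD image i []))
                (PySem.List.pyGetD loc 1 0 + radius + 1)) 1).map (fun j => (i, j))) := by
  show (PySem.List.pyRange (max 0 (PySem.List.pyGetD loc 0 0 - radius))
          (min (PySem.List.len image) (PySem.List.pyGetD loc 0 0 + radius + 1)) 1).foldl
        (fun out i =>
          (PySem.List.pyRange (max 0 (PySem.List.pyGetD loc 1 0 - radius))
            (min (PySem.List.len (PySem.List.pyGetD image i []))
              (PySem.List.pyGetD loc 1 0 + radius + 1)) 1).foldl (fun o j => o ++ [(i, j)]) out) []
      = _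
  rw [show (fun (out : List (Int × Int)) (i : Int) =>
        (PySem.List.pyRange (max 0 (PySem.List.pyGetD loc 1 0 - radius))
          (min (PySem.List.len (PySem.List.pyGetD image i []))
            (PySem.List.pyGetD loc 1 0 + radius + 1)) 1).foldl (fun o j => o ++ [(i, j)]) out)
      = (fun (out : List (Int × Int)) (i : Int) => out ++
          (PySem.List.pyRange (max 0 (PySem.List.pyGetD loc 1 0 - radius))
            (min (PySem.List.len (PySem.List.pyGetD image i []))
              (PySem.List.pyGetD loc 1 0 + radius + 1)) 1).map (fun j => (i, j))) from by
        funext out i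
        exact PySem.List.foldl_append_singleton_eq_map _ _ _]
  rw [PySem.List.foldl_append_eq_flatMap]
  rfl

-- ===== VERDICT (by name: the statement is the Claim_ definition above) =====
theorem find_region_locations_spec : Claim_equal_find_region_locations := by
  intro image loc radius _ _
  show find_region_locations image loc radius = find_region_locations_alt image loc radius
  rw [find_region_locations_eq_flatMap, alt_eq_flatMap]
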